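-- pv_equiv track=rewrite | github.com/DominikMat/string-art-robot | src/string_visualizer.py | pattern_double_bounce
-- ===== SOURCE A (Python) =====
-- NUM_PINS = 32           # Liczba gwoździ na okręgu
--
-- def pattern_double_bounce(jump_a=11, jump_b=10):
--     """6. Podwójne Odbicie: Przełącza się między dwoma różnymi 'skipami'."""
--     sequence = [0]
--     current = 0
--     for i in range(NUM_PINS * 2):
--         if i % 2 == 0:
--             current = (current + jump_a) % NUM_PINS
--         else:
--             current = (current + jump_b) % NUM_PINS
--         sequence.append(current)
--         if current == sequence[0] and i > 1:
--             break
--     return sequence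
-- ===== SOURCE B (Python) =====
-- NUM_PINS = 32
--
-- def pattern_double_bounce(jump_a=11, jump_b=10):
--     # Build all 64 jumps, scan to the full 65 running positions, then truncate
--     # at the first index >= 3 where the position returns to 0.
--     jumps = [jump_a if i % 2 == 0 else jump_b for i in range(2 * NUM_PINS)]
--     positions = [0]
--     for j in jumps:
--         positions.append((positions[-1] + j) % NUM_PINS)
--     for k in range(3, len(positions)):
--         if positions[k] == 0:
--             return positions[:k + 1]
--     return positions
-- ===== Notes on version B (the rewrite author's own statement) =====
-- stated objective: alternative
-- what changed: Replaces A's early-exit simulation loop with a build-all-then-truncate decomposition: B first scans out all 65 running positions, then in a separate pass cuts the list at the first return to pin 0 at index >= 3.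
import Mathlib
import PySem

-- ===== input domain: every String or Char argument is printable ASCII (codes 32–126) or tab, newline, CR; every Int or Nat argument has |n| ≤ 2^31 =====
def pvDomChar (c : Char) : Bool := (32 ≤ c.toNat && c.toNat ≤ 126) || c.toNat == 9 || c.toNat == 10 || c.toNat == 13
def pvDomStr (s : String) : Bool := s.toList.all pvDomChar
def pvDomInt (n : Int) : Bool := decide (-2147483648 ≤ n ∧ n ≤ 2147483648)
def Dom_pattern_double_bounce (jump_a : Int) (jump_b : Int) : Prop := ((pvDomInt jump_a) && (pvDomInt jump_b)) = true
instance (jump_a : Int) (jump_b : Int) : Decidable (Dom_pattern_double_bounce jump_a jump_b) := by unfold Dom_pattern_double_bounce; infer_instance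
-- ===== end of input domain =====

-- B rebuilds the sequence as build-all-then-truncate (scan out all 65 running positions,
-- then cut at the first return to pin 0 at index ≥ 3) instead of A's early-exit simulation
-- loop; objective: alternative decomposition, same cost.

-- ===== PORT A =====
-- the 'for i in range(NUM_PINS * 2)' loop with its early break; fuel counts the remaining
-- iterations (start: 64, index i ascends). seq is always nonempty, so sequence[0] = seq.headD 0.
def pdbLoopA (jump_a jump_b : Int) : Nat → Nat → Int → List Int → List Int
  | 0, _, _, seq => seq
  | fuel + 1, i, current, seq =>
    let current' := if i % 2 == 0 then PySem.Int.mod (current + jump_a) 32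
                    else PySem.Int.mod (current + jump_b) 32
    let seq' := seq ++ [current']
    if current' == seq'.headD 0 && decide (i > 1) then seq'
    else pdbLoopA jump_a jump_b fuel (i + 1) current' seq'

def pattern_double_bounce (jump_a : Int) (jump_b : Int) : List Int :=
  pdbLoopA jump_a jump_b 64 0 0 [0]

-- ===== PORT B =====
-- Source B's second loop 'for k in range(3, len(positions))'; fuel = len(positions) - k,
-- so k < len(positions) whenever fuel > 0 and positions[k] = positions.getD k 0.
def pdbTrunc (positions : List Int) : Nat → Nat → List Int
  | 0, _ => positions
  | fuel + 1, k =>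
    if positions.getD k 0 == 0 then positions.take (k + 1)
    else pdbTrunc positions fuel (k + 1)

def pattern_double_bounce_alt (jump_a : Int) (jump_b : Int) : List Int :=
  let jumps := (List.range 64).map (fun i => if i % 2 == 0 then jump_a else jump_b)
  -- positions[-1] on the always-nonempty accumulator is getLastD 0
  let positions := jumps.foldl (fun ps j => ps ++ [PySem.Int.mod (ps.getLastD 0 + j) 32]) [0]
  pdbTrunc positions (positions.length - 3) 3

-- ===== PRECONDITION & SPEC =====
def Spec_pattern_double_bounce (jump_a : Int) (jump_b : Int) (out : List Int) : Prop := out = pattern_double_bounce_alt jump_a jump_b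
instance (jump_a : Int) (jump_b : Int) (out : List Int) : Decidable (Spec_pattern_double_bounce jump_a jump_b out) := by unfold Spec_pattern_double_bounce; infer_instance

-- ===== CLAIM (what is proved, stated in full; the proofs are below) =====
def Claim_equal_pattern_double_bounce : Prop := ∀ (jump_a : Int) (jump_b : Int), Dom_pattern_double_bounce jump_a jump_b → Spec_pattern_double_bounce jump_a jump_b (pattern_double_bounce jump_a jump_b)

-- ===== LEMMAS AND PROOFS =====

-- the jump used at loop index i, and the running position after i steps
def pdbJump (ja jb : Int) (i : Nat) : Int := if i % 2 == 0 then ja else jb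

def gpos (ja jb : Int) : Nat → Int
  | 0 => 0
  | n + 1 => PySem.Int.mod (gpos ja jb n + pdbJump ja jb n) 32

theorem gpos_succ (ja jb : Int) (n : Nat) :
    gpos ja jb (n + 1) = PySem.Int.mod (gpos ja jb n + pdbJump ja jb n) 32 := rfl

-- B's scan produces exactly the positions gpos 0 .. gpos m
theorem pdb_scan (ja jb : Int) : ∀ m : Nat,
    ((List.range m).map (pdbJump ja jb)).foldl
        (fun ps j => ps ++ [PySem.Int.mod (ps.getLastD 0 + j) 32]) [0]
      = (List.range (m + 1)).map (gpos ja jb) := by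
  intro m
  induction m with
  | zero => simp [gpos]
  | succ m ih =>
    rw [List.range_succ (n := m), List.map_append, List.foldl_append, ih,
        List.range_succ (n := m + 1), List.map_append]
    simp [gpos_succ, List.range_succ]

theorem pdb_headD (ja jb : Int) (m : Nat) (h : 0 < m) :
    ((List.range m).map (gpos ja jb)).headD 0 = 0 := by
  obtain ⟨m', rfl⟩ := Nat.exists_eq_add_of_lt h
  simp [List.range_succ_eq_map, gpos]

theorem pdb_getD (ja jb : Int) (k : Nat) (h : k < 65) :
    ((List.range 65).map (gpos ja jb)).getD k 0 = gpos ja jb k := by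
  rw [List.getD_eq_getElem?_getD, List.getElem?_map]
  simp [List.getElem?_range h]

-- the central invariant: A's loop from index i (fuel 64 - i, i ≥ 2) equals B's truncation scan
theorem pdb_invariant (ja jb : Int) : ∀ (n i : Nat), i = 64 - n → n ≤ 62 →
    pdbLoopA ja jb n i (gpos ja jb i) ((List.range (i + 1)).map (gpos ja jb))
      = pdbTrunc ((List.range 65).map (gpos ja jb)) n (i + 1) := by
  intro n
  induction n with
  | zero =>
    intro i hi _
    subst hi
    rfl
  | succ n ih =>
    intro i hi hn
    have hi2 : 1 < i := by omega
    rw [pdbLoopA, pdbTrunc]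
    have hcur : (if i % 2 == 0 then PySem.Int.mod (gpos ja jb i + ja) 32
                 else PySem.Int.mod (gpos ja jb i + jb) 32) = gpos ja jb (i + 1) := by
      rw [gpos_succ]; unfold pdbJump; split <;> rfl
    have hseq : ((List.range (i + 1)).map (gpos ja jb)) ++ [gpos ja jb (i + 1)]
        = (List.range (i + 2)).map (gpos ja jb) := by
      rw [List.range_succ (n := i + 1), List.map_append]; rfl
    have hhead : (((List.range (i + 1)).map (gpos ja jb)) ++ [gpos ja jb (i + 1)]).headD 0 = 0 := by
      rw [hseq]; exact pdb_headD ja jb (i + 2) (by omega)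
    have hgt : decide (i > 1) = true := by simp [hi2]
    simp only [hcur, hhead, hgt, Bool.and_true]
    rw [pdb_getD ja jb (i + 1) (by omega)]
    have htake : ((List.range 65).map (gpos ja jb)).take (i + 2) = (List.range (i + 2)).map (gpos ja jb) := by
      rw [← List.map_take, List.take_range, Nat.min_eq_left (by omega : i + 2 ≤ 65)]
    rw [hseq]
    by_cases h0 : gpos ja jb (i + 1) = 0
    · simp only [h0, beq_self_eq_true, if_true]
      exact htake.symm
    · have hne : (gpos ja jb (i + 1) == 0) = false := by simp [h0]
      simp only [hne, Bool.false_eq_true, if_false]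
      exact ih (i + 1) (by omega) (by omega)

-- ===== VERDICT (by name: the statement is the Claim_ definition above) =====
theorem pattern_double_bounce_spec : Claim_equal_pattern_double_bounce := by
  intro ja jb _
  show pattern_double_bounce ja jb = pattern_double_bounce_alt ja jb
  rw [pattern_double_bounce, pattern_double_bounce_alt]
  show pdbLoopA ja jb 64 0 0 [0]
      = pdbTrunc (((List.range 64).map fun i => if i % 2 == 0 then ja else jb).foldl
            (fun ps j => ps ++ [PySem.Int.mod (ps.getLastD 0 + j) 32]) [0])
          ((((List.range 64).map fun i => if i % 2 == 0 then ja else jb).foldl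
            (fun ps j => ps ++ [PySem.Int.mod (ps.getLastD 0 + j) 32]) [0]).length - 3) 3
  have hfun : (fun i => if i % 2 == 0 then ja else jb) = pdbJump ja jb := by
    funext i; rfl
  rw [hfun, pdb_scan ja jb 64]
  have hlen : ((List.range 65).map (gpos ja jb)).length = 65 := by simp
  rw [hlen]
  -- run A's first two iterations (the break guard is off for i = 0, 1)
  have h2 : pdbLoopA ja jb 64 0 0 [0]
      = pdbLoopA ja jb 62 2 (gpos ja jb 2) ((List.range 3).map (gpos ja jb)) := by
    rw [show (64 : Nat) = 63 + 1 from rfl, pdbLoopA]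
    rw [show (63 : Nat) = 62 + 1 from rfl, pdbLoopA]
    simp [List.range_succ, gpos, pdbJump]
  rw [h2]
  exact pdb_invariant ja jb 62 2 rfl (by omega)
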